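-- pv_equiv track=rewrite | github.com/MeepMoop/battlestar | battlestar_generator.py | compute_successors
-- ===== SOURCE A (Python) =====
-- def compute_successors(candidates):
--   successors = [[] for _ in range(len(candidates))]
--   def compare_candidates(candidates, i, j):
--     for c1 in candidates[i]:
--       for c2 in candidates[j]:
--         if abs(c2 - c1) <= 1:
--           return False
--     return True
--   for i in range(len(candidates)):
--     for j in range(len(candidates)):
--       if compare_candidates(candidates,i, j):
--         successors[i].append(j)
--   return successors
-- ===== SOURCE B (Python) =====
-- def compute_successors(candidates):
--     n = len(candidates)
--     forbidden = [{x for c in ci for x in (c - 1, c, c + 1)} for ci in candidates]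
--     return [[j for j in range(n) if all(c not in forbidden[i] for c in candidates[j])]
--             for i in range(n)]
-- ===== Notes on version B (the rewrite author's own statement) =====
-- stated objective: faster
-- what changed: B precomputes, for each candidate set, the hash set of all values within distance 1 of its elements, replacing A's nested element-by-element scan per pair with a single membership pass over the other set.
import Mathlib
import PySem

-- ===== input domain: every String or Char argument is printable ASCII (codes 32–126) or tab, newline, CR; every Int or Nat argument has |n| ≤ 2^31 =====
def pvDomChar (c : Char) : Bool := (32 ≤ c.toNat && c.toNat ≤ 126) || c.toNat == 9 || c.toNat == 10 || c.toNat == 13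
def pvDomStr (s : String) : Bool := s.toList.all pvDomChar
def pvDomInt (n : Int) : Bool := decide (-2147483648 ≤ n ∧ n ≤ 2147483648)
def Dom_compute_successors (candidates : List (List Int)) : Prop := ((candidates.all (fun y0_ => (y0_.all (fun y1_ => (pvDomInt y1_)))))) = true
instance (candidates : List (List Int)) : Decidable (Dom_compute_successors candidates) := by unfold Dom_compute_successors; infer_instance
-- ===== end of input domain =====

-- B replaces A's nested per-pair element scans with a precomputed "forbidden" set of values within
-- distance 1 of each candidate set, checked by set membership (objective: faster).


-- ===== PORT A =====
-- A's helper compare_candidates: outer loop over candidates[i] with early return;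
-- the inner loop's early 'return False' is the List.any of its test.
def compareLoop (ci cj : List Int) : Bool :=
  match ci with
  | [] => true
  | c1 :: rest =>
      if cj.any (fun c2 => decide (|c2 - c1| ≤ 1)) then false else compareLoop rest cj

def compare_candidates (candidates : List (List Int)) (i j : Int) : Bool :=
  compareLoop (PySem.List.pyGetD candidates i []) (PySem.List.pyGetD candidates j [])

def compute_successors (candidates : List (List Int)) : List (List Int) :=
  let n : Int := candidates.length
  (PySem.List.pyRange 0 n 1).map (fun i =>
    (PySem.List.pyRange 0 n 1).foldl (fun acc j =>
      if compare_candidates candidates i j then acc ++ [j] else acc) [])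

-- ===== PORT B =====
def compute_successors_alt (candidates : List (List Int)) : List (List Int) :=
  let n : Int := candidates.length
  let forbidden : List (PySem.Set Int) :=
    candidates.map (fun ci => PySem.Set.ofList (ci.flatMap (fun c => [c - 1, c, c + 1])))
  (PySem.List.pyRange 0 n 1).map (fun i =>
    (PySem.List.pyRange 0 n 1).filter (fun j =>
      (PySem.List.pyGetD candidates j []).all (fun c =>
        !(PySem.Set.contains (PySem.List.pyGetD forbidden i []) c))))

-- ===== PRECONDITION & SPEC =====
def Spec_compute_successors (candidates : List (List Int)) (out : List (List Int)) : Prop := out = compute_successors_alt candidates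
instance (candidates : List (List Int)) (out : List (List Int)) : Decidable (Spec_compute_successors candidates out) := by unfold Spec_compute_successors; infer_instance

-- ===== CLAIM (what is proved, stated in full; the proofs are below) =====
def Claim_equal_compute_successors : Prop := ∀ (candidates : List (List Int)), Dom_compute_successors candidates → Spec_compute_successors candidates (compute_successors candidates)

-- ===== LEMMAS AND PROOFS =====

-- A's compare loop is the negated double-any.
theorem compareLoop_eq (ci cj : List Int) :
    compareLoop ci cj = !(ci.any (fun c1 => cj.any (fun c2 => decide (|c2 - c1| ≤ 1)))) := by
  induction ci with
  | nil => rfl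
  | cons c1 rest ih =>
      cases h : cj.any (fun c2 => decide (|c2 - c1| ≤ 1)) <;>
        simp [compareLoop, h, ih]

-- pointwise agreement of the two row predicates
theorem pred_eq (ci cj : List Int) :
    cj.all (fun c => !(PySem.Set.contains (PySem.Set.ofList (ci.flatMap (fun c1 => [c1 - 1, c1, c1 + 1]))) c))
      = compareLoop ci cj := by
  rw [compareLoop_eq, Bool.eq_iff_iff]
  simp only [List.all_eq_true, Bool.not_eq_true', List.any_eq_false, List.any_eq_true,
    PySem.Set.contains, List.contains_eq_mem, decide_eq_false_iff_not, PySem.Set.mem_ofList,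
    List.mem_flatMap, List.mem_cons, List.not_mem_nil, or_false, decide_eq_true_eq, not_exists,
    not_and, not_or, abs_le]
  constructor
  · intro h c1 h1 c2 h2
    rcases h c2 h2 c1 h1 with ⟨e1, e2, e3⟩
    omega
  · intro h c2 h2 c1 h1
    have := h c1 h1 c2 h2
    omega

theorem row_eq (candidates : List (List Int)) (i : Int) :
    (PySem.List.pyRange 0 candidates.length 1).foldl (fun acc j =>
        if compare_candidates candidates i j then acc ++ [j] else acc) []
    = (PySem.List.pyRange 0 candidates.length 1).filter (fun j =>
        (PySem.List.pyGetD candidates j []).all (fun c =>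
          !(PySem.Set.contains (PySem.List.pyGetD
              (candidates.map (fun ci => PySem.Set.ofList (ci.flatMap (fun c1 => [c1 - 1, c1, c1 + 1])))) i []) c))) := by
  rw [PySem.List.foldl_append_if_eq_filter, List.nil_append]
  apply List.filter_congr
  intro j _
  have hmap : PySem.List.pyGetD
      (candidates.map (fun ci => PySem.Set.ofList (ci.flatMap (fun c1 => [c1 - 1, c1, c1 + 1])))) i []
      = PySem.Set.ofList ((PySem.List.pyGetD candidates i []).flatMap (fun c1 => [c1 - 1, c1, c1 + 1])) := by
    simpa using PySem.List.pyGetD_map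
      (f := fun ci => PySem.Set.ofList (ci.flatMap (fun c1 => [c1 - 1, c1, c1 + 1])))
      (xs := candidates) (i := i) (d := [])
  rw [hmap, pred_eq]
  rfl

-- ===== VERDICT (by name: the statement is the Claim_ definition above) =====
theorem compute_successors_spec : Claim_equal_compute_successors := by
  intro candidates _
  unfold Spec_compute_successors compute_successors compute_successors_alt
  simp only []
  exact List.map_congr_left (fun i _ => row_eq candidates i)
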